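-- pv_equiv track=rewrite | github.com/polyphony-dev/polyphony | polyphony/compiler/ahdl/transformers/iotransformer.py | _partition_codes
-- ===== SOURCE A (Python) =====
-- def _partition_codes(codes, delim):
--     partitions = []
--     part = []
--     for c in codes:
--         if c is delim:
--             partitions.append(part)
--             part = []
--         else:
--             part.append(c)
--     partitions.append(part)
--     return partitions
-- ===== SOURCE B (Python) =====
-- def _partition_codes(codes, delim):
--     idxs = [i for i, c in enumerate(codes) if c == delim]
--     parts = []
--     prev = 0
--     for i in idxs:
--         parts.append(codes[prev:i])
--         prev = i + 1
--     parts.append(codes[prev:])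
--     return parts
-- ===== Notes on version B (the rewrite author's own statement) =====
-- stated objective: alternative
-- what changed: B first computes the list of delimiter positions, then slices the original list between consecutive positions, instead of accumulating one element at a time into a growing current part.
-- outside the precondition, e.g. on _partition_codes([1000, 2, 1000], 1000): A returns [[1000, 2, 1000]], B returns [[], [2], []]
import Mathlib
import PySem

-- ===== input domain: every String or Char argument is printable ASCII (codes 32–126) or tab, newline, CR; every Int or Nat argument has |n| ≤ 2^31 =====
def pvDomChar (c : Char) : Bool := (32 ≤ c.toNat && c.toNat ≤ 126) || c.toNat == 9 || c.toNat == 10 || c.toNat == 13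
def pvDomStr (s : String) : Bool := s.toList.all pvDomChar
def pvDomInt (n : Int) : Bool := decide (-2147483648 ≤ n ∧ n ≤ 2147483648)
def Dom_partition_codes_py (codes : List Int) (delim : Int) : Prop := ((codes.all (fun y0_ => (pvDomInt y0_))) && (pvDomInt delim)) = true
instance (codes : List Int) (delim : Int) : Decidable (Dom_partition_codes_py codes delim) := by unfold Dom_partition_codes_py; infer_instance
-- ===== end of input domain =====

-- B replaces A's element-by-element accumulation by an index-then-slice decomposition (same O(n) cost);
-- the ports model Python's `c is delim` as numeric equality, which is exact only under Pre_ below.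

-- ===== PORT A =====
-- CPython `a is b` on two independently built ints: identical iff equal and in the small-int cache [-5, 256].
def pyIntIs (a b : Int) : Bool := a == b && decide (-5 ≤ b) && decide (b ≤ 256)

-- Loop state (partitions, part); A's `c is delim` ported via pyIntIs.
def partition_codes_py (codes : List Int) (delim : Int) : List (List Int) :=
  let s := codes.foldl
    (fun (st : List (List Int) × List Int) c =>
      if pyIntIs c delim then (st.1 ++ [st.2], ([] : List Int)) else (st.1, st.2 ++ [c]))
    ([], [])
  s.1 ++ [s.2]

-- ===== PORT B =====
-- idxs = delimiter positions; then fold over idxs slicing codes[prev:i], finally codes[prev:].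
def partition_codes_py_alt (codes : List Int) (delim : Int) : List (List Int) :=
  let idxs := ((PySem.List.enumerate codes 0).filter (fun p => p.2 == delim)).map (·.1)
  let s := idxs.foldl
    (fun (st : List (List Int) × Int) i =>
      (st.1 ++ [PySem.List.slice codes (some st.2) (some i)], i + 1))
    ([], (0 : Int))
  s.1 ++ [PySem.List.slice codes (some s.2) none]

-- ===== PRECONDITION & SPEC =====
-- Pre_ excludes inputs on which the delimiter occurs by VALUE in codes but lies outside CPython's
-- small-int cache [-5, 256]: there A's `c is delim` identity test depends on accidental int
-- interning, so A's value is an artefact of object identity that no port over Int can specify.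
def Pre_partition_codes_py (codes : List Int) (delim : Int) : Prop :=
  delim ∈ codes → (-5 ≤ delim ∧ delim ≤ 256)
instance (codes : List Int) (delim : Int) : Decidable (Pre_partition_codes_py codes delim) := by
  unfold Pre_partition_codes_py; infer_instance
def pvWitness_partition_codes_py : List Int × Int := ([1, 2, 1, 3], 1)

def Spec_partition_codes_py (codes : List Int) (delim : Int) (out : List (List Int)) : Prop := out = partition_codes_py_alt codes delim
instance (codes : List Int) (delim : Int) (out : List (List Int)) : Decidable (Spec_partition_codes_py codes delim out) := by unfold Spec_partition_codes_py; infer_instance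

-- ===== CLAIM (what is proved, stated in full; the proofs are below) =====
def Claim_equal_partition_codes_py : Prop := ∀ (codes : List Int) (delim : Int), Dom_partition_codes_py codes delim → Pre_partition_codes_py codes delim → Spec_partition_codes_py codes delim (partition_codes_py codes delim)

-- ===== LEMMAS AND PROOFS =====

/-- Reference split: the common value both ports compute. -/
def pvSplit (d : Int) : List Int → List (List Int)
  | [] => [[]]
  | c :: cs => if c = d then [] :: pvSplit d cs else (pvSplit d cs).modifyHead (c :: ·)

theorem pv_modifyHead_nil_append (l : List (List Int)) :
    l.modifyHead (fun x => [] ++ x) = l := by cases l <;> simp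

theorem pv_slice_self (full : List Int) (k : Int) :
    PySem.List.slice full (some k) (some k) = [] := by
  apply List.eq_nil_of_length_eq_zero
  rw [PySem.List.length_slice]
  omega

theorem portA_foldl (d : Int) (cs : List Int) (acc : List (List Int)) (part : List Int)
    (hp : ∀ c ∈ cs, c = d → (-5 ≤ d ∧ d ≤ 256)) :
    (cs.foldl
        (fun (st : List (List Int) × List Int) c =>
          if pyIntIs c d then (st.1 ++ [st.2], ([] : List Int)) else (st.1, st.2 ++ [c]))
        (acc, part)).1 ++
      [(cs.foldl
        (fun (st : List (List Int) × List Int) c =>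
          if pyIntIs c d then (st.1 ++ [st.2], ([] : List Int)) else (st.1, st.2 ++ [c]))
        (acc, part)).2] = acc ++ (pvSplit d cs).modifyHead (part ++ ·) := by
  induction cs generalizing acc part with
  | nil => simp [pvSplit]
  | cons c cs ih =>
    have hptail : ∀ c ∈ cs, c = d → (-5 ≤ d ∧ d ≤ 256) :=
      fun x hx => hp x (List.mem_cons_of_mem _ hx)
    simp only [List.foldl_cons]
    by_cases h : c = d
    · have hb := hp c (List.mem_cons_self) h
      rw [if_pos (by simp [pyIntIs, h, hb.1, hb.2]), ih _ _ hptail]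
      simp only [pvSplit, if_pos h]
      cases pvSplit d cs <;> simp
    · rw [if_neg (by simp [pyIntIs, h]), ih _ _ hptail]
      simp only [pvSplit, if_neg h]
      cases pvSplit d cs <;> simp

theorem portA_eq_pvSplit (codes : List Int) (d : Int)
    (hpre : Pre_partition_codes_py codes d) :
    partition_codes_py codes d = pvSplit d codes := by
  show _ ++ _ = _
  rw [portA_foldl d codes [] [] (fun c hc he => hpre (he ▸ hc)),
    pv_modifyHead_nil_append, List.nil_append]

theorem portB_foldl (d : Int) (full : List Int) (cs : List Int) (k j : Nat)
    (hjk : j ≤ k) (hdrop : full.drop k = cs) (acc : List (List Int)) :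
    ((((PySem.List.enumerate cs (k : Int)).filter (fun p => p.2 == d)).map (·.1)).foldl
        (fun (st : List (List Int) × Int) i =>
          (st.1 ++ [PySem.List.slice full (some st.2) (some i)], i + 1))
        (acc, (j : Int))).1 ++
      [PySem.List.slice full
        (some ((((PySem.List.enumerate cs (k : Int)).filter (fun p => p.2 == d)).map (·.1)).foldl
          (fun (st : List (List Int) × Int) i =>
            (st.1 ++ [PySem.List.slice full (some st.2) (some i)], i + 1))
          (acc, (j : Int))).2) none] =
      acc ++ (pvSplit d cs).modifyHead
        (fun h => PySem.List.slice full (some (j : Int)) (some (k : Int)) ++ h) := by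
  induction cs generalizing k j acc with
  | nil =>
    have hlen : full.length ≤ k := List.drop_eq_nil_iff.mp hdrop
    simp only [PySem.List.enumerate_nil, List.filter_nil, List.map_nil, List.foldl_nil, pvSplit,
      List.modifyHead]
    rw [PySem.List.slice_from_natCast, PySem.List.slice_natCast,
      List.take_of_length_le (by simp; omega)]
    simp
  | cons c cs ih =>
    have hk : full.drop (k + 1) = cs := by
      have := congrArg List.tail hdrop
      simpa [List.tail_drop] using this
    have hcast : ((k : Int) + 1) = ((k + 1 : Nat) : Int) := by push_cast; ring
    rw [PySem.List.enumerate_cons]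
    by_cases h : c = d
    · simp only [h, List.filter_cons, beq_self_eq_true, if_true, List.map_cons, List.foldl_cons]
      rw [hcast, ih (k + 1) (k + 1) (le_refl _) hk]
      rw [show pvSplit d (d :: cs) = [] :: pvSplit d cs by simp [pvSplit]]
      simp only [pv_slice_self, pv_modifyHead_nil_append, List.modifyHead_cons]
      simp [List.append_assoc]
    · have hne : (c == d) = false := by simp [h]
      simp only [List.filter_cons, hne, Bool.false_eq_true, if_false]
      rw [hcast, ih (k + 1) j (by omega) hk]
      have hget : full[k]? = some c := by
        have h0 : (full.drop k)[0]? = some c := by simp [hdrop]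
        simpa [List.getElem?_drop] using h0
      have hslice : PySem.List.slice full (some (j : Int)) (some ((k : Int) + 1)) =
          PySem.List.slice full (some (j : Int)) (some (k : Int)) ++ [c] := by
        rw [hcast]
        simp only [PySem.List.slice_natCast]
        have h1 : k + 1 - j = (k - j) + 1 := by omega
        rw [h1, List.take_add_one]
        congr 1
        have h2 : (full.drop j)[k - j]? = full[j + (k - j)]? := by simp [List.getElem?_drop]
        rw [h2, Nat.add_sub_cancel' hjk, hget]
        rfl
      simp only [pvSplit, if_neg h]
      cases pvSplit d cs <;> simp [hslice, List.append_assoc]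

theorem portB_eq_pvSplit (codes : List Int) (d : Int) :
    partition_codes_py_alt codes d = pvSplit d codes := by
  show _ ++ _ = _
  have h := portB_foldl d codes codes 0 0 (le_refl 0) (by simp) []
  rw [pv_slice_self, pv_modifyHead_nil_append, List.nil_append] at h
  simpa using h

-- ===== VERDICT (by name: the statement is the Claim_ definition above) =====
theorem partition_codes_py_spec : Claim_equal_partition_codes_py := by
  intro codes delim _ hpre
  unfold Spec_partition_codes_py
  rw [portA_eq_pvSplit codes delim hpre, portB_eq_pvSplit]
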